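-- pv_equiv track=rewrite | github.com/zacharyzhuo/Factor-Analysis | Factor-Analysis/node/node_handler.py | distribute_batch_task
-- ===== SOURCE A (Python) =====
-- def distribute_batch_task(task_num, node_num):
--     # 將任務平分給各個節點 未整除的部分都給最後一個節點
--     batch_task_num = task_num // node_num
--     # 整除的時候 = 0
--     over_task = task_num % node_num
--     batch_task_list = []
--
--     for i in range(node_num):
--         if i == 0: # 第一個
--             batch_task_list.append([0, batch_task_num])
--         elif i+1 == node_num: # 最後一個
--             batch_task_list.append([batch_task_num*i, batch_task_num*(i+1)+over_task])
--         else: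
--             batch_task_list.append([batch_task_num*i, batch_task_num*(i+1)])
--     return batch_task_list
-- ===== SOURCE B (Python) =====
-- def distribute_batch_task(task_num, node_num):
--     batch, over = divmod(task_num, node_num)
--     sizes = [batch] * node_num
--     if sizes:
--         sizes[-1] += over
--     result = []
--     start = 0
--     for size in sizes:
--         result.append([start, start + size])
--         start += size
--     return result
-- ===== Notes on version B (the rewrite author's own statement) =====
-- stated objective: alternative
-- what changed: Instead of per-index first/middle/last branching with multiplications batch*i, B first builds a list of chunk SIZES (remainder folded into the last size) and then emits intervals with a single running-start accumulator (prefix sums of the sizes), with no index arithmetic in the loop.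
import Mathlib
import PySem

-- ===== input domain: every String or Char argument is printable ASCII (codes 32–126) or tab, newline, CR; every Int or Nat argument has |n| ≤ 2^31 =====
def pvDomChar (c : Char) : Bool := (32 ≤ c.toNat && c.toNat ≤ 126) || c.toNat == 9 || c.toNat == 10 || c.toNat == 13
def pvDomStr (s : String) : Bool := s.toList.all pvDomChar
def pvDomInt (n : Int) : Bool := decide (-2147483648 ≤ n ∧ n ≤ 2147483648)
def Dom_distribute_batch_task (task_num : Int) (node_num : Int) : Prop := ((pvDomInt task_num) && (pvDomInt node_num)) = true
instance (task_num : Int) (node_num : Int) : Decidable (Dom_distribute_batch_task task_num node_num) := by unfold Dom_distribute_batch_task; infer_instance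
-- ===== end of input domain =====

-- B builds a list of chunk sizes (remainder folded into the last size) and emits intervals from a
-- running-start accumulator (prefix sums), with no per-index branching or multiplication (objective: alternative).

-- ===== PORT A =====
def distribute_batch_task (task_num : Int) (node_num : Int) : List (List Int) :=
  let batch_task_num := PySem.Int.floordiv task_num node_num
  let over_task := PySem.Int.mod task_num node_num
  (PySem.List.pyRange 0 node_num 1).foldl (fun batch_task_list i =>
    batch_task_list ++
      [if i = 0 then [0, batch_task_num]
       else if i + 1 = node_num then [batch_task_num * i, batch_task_num * (i + 1) + over_task]
       else [batch_task_num * i, batch_task_num * (i + 1)]]) []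

-- ===== PORT B =====
def distribute_batch_task_alt (task_num : Int) (node_num : Int) : List (List Int) :=
  let batch := PySem.Int.floordiv task_num node_num
  let ov := PySem.Int.mod task_num node_num
  let sizes0 := PySem.List.pyRepeat [batch] node_num           -- [batch] * node_num
  let sizes := if sizes0 = [] then sizes0
               else sizes0.dropLast ++ [sizes0.getLast! + ov]  -- sizes[-1] += over
  (sizes.foldl (fun (st : List (List Int) × Int) size =>
      (st.1 ++ [[st.2, st.2 + size]], st.2 + size)) ([], 0)).1

-- ===== PRECONDITION & SPEC =====
-- A raises ZeroDivisionError when node_num = 0; Pre_ excludes exactly that.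
def Pre_distribute_batch_task (task_num : Int) (node_num : Int) : Prop := node_num ≠ 0
instance (task_num : Int) (node_num : Int) : Decidable (Pre_distribute_batch_task task_num node_num) := by unfold Pre_distribute_batch_task; infer_instance
def pvWitness_distribute_batch_task : Int × Int := (10, 3)

def Spec_distribute_batch_task (task_num : Int) (node_num : Int) (out : List (List Int)) : Prop := out = distribute_batch_task_alt task_num node_num
instance (task_num : Int) (node_num : Int) (out : List (List Int)) : Decidable (Spec_distribute_batch_task task_num node_num out) := by unfold Spec_distribute_batch_task; infer_instance

-- ===== CLAIM (what is proved, stated in full; the proofs are below) =====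
def Claim_equal_distribute_batch_task : Prop := ∀ (task_num : Int) (node_num : Int), Dom_distribute_batch_task task_num node_num → Pre_distribute_batch_task task_num node_num → Spec_distribute_batch_task task_num node_num (distribute_batch_task task_num node_num)

-- ===== LEMMAS AND PROOFS =====

-- the interval emitter of B, in closed recursive form
def pvIntervalsFrom (s : Int) : List Int → List (List Int)
  | [] => []
  | x :: xs => [s, s + x] :: pvIntervalsFrom (s + x) xs

lemma pv_foldl_intervals (sizes : List Int) (acc : List (List Int)) (s : Int) :
    (sizes.foldl (fun (st : List (List Int) × Int) size =>
        (st.1 ++ [[st.2, st.2 + size]], st.2 + size)) (acc, s)).1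
      = acc ++ pvIntervalsFrom s sizes := by
  induction sizes generalizing acc s with
  | nil => simp [pvIntervalsFrom]
  | cons x xs ih =>
    simp only [List.foldl_cons, pvIntervalsFrom, ih]
    simp

lemma pv_intervalsFrom_replicate (k : Nat) (b s : Int) :
    pvIntervalsFrom s (List.replicate k b)
      = (List.range k).map (fun (j : Nat) => [s + b * (j : Int), s + b * ((j : Int) + 1)]) := by
  induction k generalizing s with
  | zero => simp [pvIntervalsFrom]
  | succ m ih =>
    rw [List.replicate_succ, List.range_succ_eq_map, List.map_cons]
    simp only [pvIntervalsFrom, ih, List.map_map]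
    refine List.cons_eq_cons.mpr ⟨by norm_num, ?_⟩
    apply List.map_congr_left
    intro j _
    simp only [Function.comp_apply]
    push_cast
    refine List.cons_eq_cons.mpr ⟨by ring, ?_⟩
    refine List.cons_eq_cons.mpr ⟨by ring, rfl⟩

lemma pv_intervalsFrom_append (s : Int) (xs ys : List Int) :
    pvIntervalsFrom s (xs ++ ys)
      = pvIntervalsFrom s xs ++ pvIntervalsFrom (s + xs.sum) ys := by
  induction xs generalizing s with
  | nil => simp [pvIntervalsFrom]
  | cons x t ih =>
    simp only [List.cons_append, pvIntervalsFrom, ih, List.sum_cons, ← add_assoc]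

theorem distribute_batch_task_spec_aux (task_num node_num : Int) (hn : node_num ≠ 0) :
    distribute_batch_task task_num node_num = distribute_batch_task_alt task_num node_num := by
  unfold distribute_batch_task distribute_batch_task_alt
  simp only [PySem.List.foldl_append_singleton_eq_map, List.nil_append,
    PySem.List.pyRepeat_singleton, pv_foldl_intervals]
  set b := PySem.Int.floordiv task_num node_num with hb
  set ov := PySem.Int.mod task_num node_num with hov
  by_cases hneg : node_num ≤ 0
  · -- node_num < 0: both sides are empty
    have h1 : PySem.List.pyRange 0 node_num 1 = [] := PySem.List.pyRange_one_eq_nil (by omega)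
    have h2 : node_num.toNat = 0 := by omega
    simp [h1, h2, pvIntervalsFrom]
  · obtain ⟨m, hm⟩ : ∃ m, node_num.toNat = m + 1 := ⟨node_num.toNat - 1, by omega⟩
    have hmn : (node_num : Int) = (m : Int) + 1 := by omega
    rw [hm, List.replicate_succ', if_neg (by simp), List.dropLast_concat]
    have hgl : (List.replicate m b ++ [b]).getLast! = b := by simp
    rw [hgl, pv_intervalsFrom_append, pv_intervalsFrom_replicate]
    simp only [List.sum_replicate, nsmul_eq_mul, pvIntervalsFrom, zero_add]
    rw [PySem.List.pyRange_one, show ((node_num - 0).toNat) = m + 1 from by omega,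
        List.range_succ, List.map_append, List.map_append, List.map_map, List.map_map]
    congr 1
    · -- the first m intervals
      apply List.map_congr_left
      intro j hj
      rw [List.mem_range] at hj
      simp only [Function.comp_apply]
      have hjlt : (0 : Int) + (j : Int) + 1 ≠ node_num := by omega
      by_cases hj0 : j = 0
      · subst hj0
        simp
      · have hne0 : (0 : Int) + (j : Int) ≠ 0 := by omega
        simp only [hne0, if_false, hjlt, if_false]
        refine List.cons_eq_cons.mpr ⟨by ring, ?_⟩
        refine List.cons_eq_cons.mpr ⟨by ring, rfl⟩
    · -- the last interval (the remainder goes here)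
      simp only [List.map_cons, List.map_nil, Function.comp_apply]
      have hlast : (0 : Int) + (m : Int) + 1 = node_num := by omega
      by_cases hm0 : m = 0
      · -- node_num = 1: A takes the i = 0 branch, and ov = task_num % 1 = 0
        subst hm0
        have h1 : node_num = 1 := by omega
        have hov0 : ov = 0 := by
          rw [hov, h1]
          simp [PySem.Int.mod]
        simp [hov0]
      · have hne0 : (0 : Int) + (m : Int) ≠ 0 := by
          have : (0:Int) < (m:Int) := by exact_mod_cast Nat.pos_of_ne_zero hm0
          omega
        simp only [hne0, if_false, hlast, if_true]
        refine List.cons_eq_cons.mpr ⟨?_, ?_⟩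
        · refine List.cons_eq_cons.mpr ⟨by ring, ?_⟩
          refine List.cons_eq_cons.mpr ⟨by rw [← hlast]; ring, rfl⟩
        · rfl

-- ===== VERDICT (by name: the statement is the Claim_ definition above) =====
theorem distribute_batch_task_spec : Claim_equal_distribute_batch_task := by
  intro task_num node_num _ hpre
  exact distribute_batch_task_spec_aux task_num node_num hpre
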